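-- pv_equiv track=rewrite | github.com/novalis133/docops-agent | src/analysis/gap_analyzer.py | _docs_related
-- ===== SOURCE A (Python) =====
-- def _docs_related(type_a: str, type_b: str) -> bool:
--     """Check if two document types are related."""
--     # Direct match
--     if type_a == type_b:
--         return True
--
--     # Related pairs
--     related_pairs = [
--         ("handbook", "policy"),
--         ("handbook", "security"),
--         ("handbook", "remote"),
--         ("security", "remote"),
--         ("security", "compliance"),
--         ("policy", "compliance"),
--     ]
--
--     for pair in related_pairs:
--         if (type_a in pair and type_b in pair):
--             return True
--
--     return False
-- ===== SOURCE B (Python) =====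
-- _PAIRS = [
--     ("handbook", "policy"),
--     ("handbook", "security"),
--     ("handbook", "remote"),
--     ("security", "remote"),
--     ("security", "compliance"),
--     ("policy", "compliance"),
-- ]
--
-- _ADJ = {}
-- for _x, _y in _PAIRS:
--     _ADJ.setdefault(_x, set()).add(_y)
--     _ADJ.setdefault(_y, set()).add(_x)
--
--
-- def _docs_related(type_a: str, type_b: str) -> bool:
--     """Check if two document types are related."""
--     if type_a == type_b:
--         return True
--     return type_b in _ADJ.get(type_a, ())
-- ===== Notes on version B (the rewrite author's own statement) =====
-- stated objective: idiomatic
-- what changed: Replaced the per-call linear scan over edge pairs (with tuple membership tests) by a module-level precomputed symmetric adjacency dict, so the function does one dict lookup and one set membership test.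
import Mathlib
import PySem

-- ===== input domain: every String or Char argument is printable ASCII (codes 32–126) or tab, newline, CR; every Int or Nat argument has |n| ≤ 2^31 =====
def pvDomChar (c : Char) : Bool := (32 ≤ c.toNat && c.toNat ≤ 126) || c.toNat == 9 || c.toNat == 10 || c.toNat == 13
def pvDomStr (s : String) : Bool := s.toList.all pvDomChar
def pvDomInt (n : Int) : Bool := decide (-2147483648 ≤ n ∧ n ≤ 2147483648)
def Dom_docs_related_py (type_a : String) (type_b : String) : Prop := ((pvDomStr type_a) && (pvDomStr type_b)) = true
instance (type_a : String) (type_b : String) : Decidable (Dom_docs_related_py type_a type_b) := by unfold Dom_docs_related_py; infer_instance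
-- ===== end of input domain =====

-- B replaces A's linear scan over edge pairs by a precomputed adjacency dict (one lookup); objective: idiomatic.

-- ===== PORT A =====
-- the literal list `related_pairs` from A
def relatedPairs : List (String × String) :=
  [("handbook", "policy"), ("handbook", "security"), ("handbook", "remote"),
   ("security", "remote"), ("security", "compliance"), ("policy", "compliance")]

-- the `for pair in related_pairs: if … return True` loop, with early return
def relLoop (type_a : String) (type_b : String) : List (String × String) → Bool
  | [] => false
  | (x, y) :: rest =>
      if ((type_a == x || type_a == y) && (type_b == x || type_b == y)) then true
      else relLoop type_a type_b rest

def docs_related_py (type_a : String) (type_b : String) : Bool :=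
  if type_a == type_b then true
  else relLoop type_a type_b relatedPairs

-- ===== PORT B =====
-- module-level build of _ADJ: for x, y in _PAIRS: adj.setdefault(x,set()).add(y); adj.setdefault(y,set()).add(x)
-- Source B's _PAIRS literal
def bPairs : List (String × String) :=
  [("handbook", "policy"), ("handbook", "security"), ("handbook", "remote"),
   ("security", "remote"), ("security", "compliance"), ("policy", "compliance")]

def adjDict : PySem.Dict String (PySem.Set String) :=
  bPairs.foldl
    (fun d p =>
      let d := d.insert p.1 (PySem.Set.add (d.getD p.1 PySem.Set.empty) p.2)
      d.insert p.2 (PySem.Set.add (d.getD p.2 PySem.Set.empty) p.1))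
    PySem.Dict.empty

def docs_related_py_alt (type_a : String) (type_b : String) : Bool :=
  if type_a == type_b then true
  else PySem.Set.contains (adjDict.getD type_a PySem.Set.empty) type_b

-- ===== PRECONDITION & SPEC =====
def Spec_docs_related_py (type_a : String) (type_b : String) (out : Bool) : Prop := out = docs_related_py_alt type_a type_b
instance (type_a : String) (type_b : String) (out : Bool) : Decidable (Spec_docs_related_py type_a type_b out) := by unfold Spec_docs_related_py; infer_instance

-- ===== CLAIM (what is proved, stated in full; the proofs are below) =====
def Claim_equal_docs_related_py : Prop := ∀ (type_a : String) (type_b : String), Dom_docs_related_py type_a type_b → Spec_docs_related_py type_a type_b (docs_related_py type_a type_b)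

-- ===== LEMMAS AND PROOFS =====

-- ===== VERDICT (by name: the statement is the Claim_ definition above) =====
theorem docs_related_py_spec : Claim_equal_docs_related_py := by
  intro a b _
  unfold Spec_docs_related_py
  have hadj : adjDict = PySem.Dict.mk
      [("handbook", ["policy", "security", "remote"]),
       ("policy", ["handbook", "compliance"]),
       ("security", ["handbook", "remote", "compliance"]),
       ("remote", ["handbook", "security"]),
       ("compliance", ["security", "policy"])] := by decide
  unfold docs_related_py docs_related_py_alt
  rw [hadj]
  by_cases hab : a = b
  · simp [hab]
  · have hba : ¬ b = a := fun h => hab h.symm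
    simp only [beq_iff_eq, if_neg hab]
    by_cases h1 : a = "handbook" <;> by_cases h2 : a = "policy" <;>
      by_cases h3 : a = "security" <;> by_cases h4 : a = "remote" <;>
      by_cases h5 : a = "compliance" <;>
      (simp only [PySem.Set.contains]
       simp_all [relLoop, relatedPairs, PySem.Dict.getD, PySem.Dict.get?, Ne.symm hab])
    all_goals
      have h1' : ¬ ("handbook" = a) := fun h => h1 h.symm
      have h2' : ¬ ("policy" = a) := fun h => h2 h.symm
      have h3' : ¬ ("security" = a) := fun h => h3 h.symm
      have h4' : ¬ ("remote" = a) := fun h => h4 h.symm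
      have h5' : ¬ ("compliance" = a) := fun h => h5 h.symm
      have e1 : ("handbook" == a) = false := beq_eq_false_iff_ne.mpr h1'
      have e2 : ("policy" == a) = false := beq_eq_false_iff_ne.mpr h2'
      have e3 : ("security" == a) = false := beq_eq_false_iff_ne.mpr h3'
      have e4 : ("remote" == a) = false := beq_eq_false_iff_ne.mpr h4'
      have e5 : ("compliance" == a) = false := beq_eq_false_iff_ne.mpr h5'
      simp only [List.find?, e1, e2, e3, e4, e5]
      simp
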